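-- pv_equiv track=rewrite | github.com/miao38/Music-Generator-Website | Music Generator/Music_Generator_2.py | generate_input_and_target
-- ===== SOURCE A (Python) =====
-- def generate_input_and_target(dict_keys_time, seq_len = 50):
--     #getting the start and end time
--     start = list(dict_keys_time.keys())[0]
--     end = list(dict_keys_time.keys())[-1]
--     list_train = []
--     list_target = []
--     for index, time in enumerate(range(start, end)):
--         list_append_train = []
--         list_append_target = []
--         i = 0
--         flag = False #flag to append the test list
--         if index < seq_len:
--             i = seq_len - index - 1
--             for j in range(i): #add "e" to the seq list
--                 list_append_train.append("e")
--                 flag = True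
--         for j in range(i, seq_len):
--             index = time - (seq_len - j - 1)
--             if index in dict_keys_time:
--                 list_append_train.append(",".join(str(x) for x in dict_keys_time[index]))
--             else:
--                 list_append_train.append("e")
--         #add time + 1 to the list_append_target
--         if time + 1 in dict_keys_time:
--             list_append_target.append(",".join(str(x) for x in dict_keys_time[time + 1]))
--         else:
--             list_append_target.append("e")
--         list_train.append(list_append_train)
--         list_target.append(list_append_target)
--     return list_train, list_target
-- ===== SOURCE B (Python) =====
-- def generate_input_and_target(dict_keys_time, seq_len=50):
--     keys = list(dict_keys_time.keys())
--     start, end = keys[0], keys[-1]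
--
--     if end <= start:
--         return [], []
--
--     def rep(t):
--         return ",".join(str(x) for x in dict_keys_time[t]) if t in dict_keys_time else "e"
--
--     L = max(seq_len, 0)
--     # one flat padded table of per-time representations, then window slicing
--     padded = ["e"] * (L - 1) + [rep(t) for t in range(start, end)]
--     list_train = [padded[i:i + L] for i in range(end - start)]
--     list_target = [[rep(t)] for t in range(start + 1, end + 1)]
--     return list_train, list_target
-- ===== Notes on version B (the rewrite author's own statement) =====
-- stated objective: simpler
-- what changed: B precomputes one flat padded per-time representation table and takes window slices of it, replacing A's per-row conditional padding loop and reindexing arithmetic; targets become a direct comprehension over range(start+1, end+1).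
import Mathlib
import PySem

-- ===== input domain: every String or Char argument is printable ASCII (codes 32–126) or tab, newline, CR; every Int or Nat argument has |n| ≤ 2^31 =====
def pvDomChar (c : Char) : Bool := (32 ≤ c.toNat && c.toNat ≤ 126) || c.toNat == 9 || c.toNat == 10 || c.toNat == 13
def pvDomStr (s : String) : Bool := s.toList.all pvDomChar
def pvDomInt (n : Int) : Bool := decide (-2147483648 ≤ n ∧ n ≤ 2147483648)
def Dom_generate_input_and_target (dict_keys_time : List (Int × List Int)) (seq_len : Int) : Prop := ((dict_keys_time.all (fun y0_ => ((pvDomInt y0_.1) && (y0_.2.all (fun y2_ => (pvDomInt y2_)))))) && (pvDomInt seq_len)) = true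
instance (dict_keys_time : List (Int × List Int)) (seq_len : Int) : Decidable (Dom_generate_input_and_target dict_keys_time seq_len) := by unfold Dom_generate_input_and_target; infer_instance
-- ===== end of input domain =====

-- B replaces A's per-row conditional padding loop and reindex arithmetic by one flat padded
-- representation table plus window slicing (objective: simpler; same asymptotic cost).

-- ===== PORT A =====
-- shared: ','.join(str(x) for x in dict[t]) if t in dict else "e" (both Pythons contain this expression)
def pvRep (d : List (Int × List Int)) (t : Int) : String :=
  match d.lookup t with
  | some v => PySem.Str.join "," (v.map PySem.Int.toStr)
  | none => "e"

-- the body of A's `for index, time in enumerate(range(start, end))` loop (train row)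
def pvRowA (d : List (Int × List Int)) (seq_len : Int) (p : Int × Int) : List String :=
  let index := p.1
  let time := p.2
  let i : Int := if index < seq_len then seq_len - index - 1 else 0
  let pad : List String :=
    if index < seq_len then (PySem.List.pyRange 0 i 1).foldl (fun l _ => l ++ ["e"]) [] else []
  (PySem.List.pyRange i seq_len 1).foldl
    (fun l j => l ++ [pvRep d (time - (seq_len - j - 1))]) pad

def generate_input_and_target (dict_keys_time : List (Int × List Int)) (seq_len : Int) :
    List (List String) × List (List String) :=
  let keys := dict_keys_time.map Prod.fst
  let start := (PySem.List.pyGet? keys 0).getD 0        -- IndexError on empty dict: excluded by Pre_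
  let «end» := (PySem.List.pyGet? keys (-1)).getD 0
  (PySem.List.enumerate (PySem.List.pyRange start «end» 1) 0).foldl
    (fun acc p => (acc.1 ++ [pvRowA dict_keys_time seq_len p],
                   acc.2 ++ [[pvRep dict_keys_time (p.2 + 1)]]))
    ([], [])

-- ===== PORT B =====
def generate_input_and_target_alt (dict_keys_time : List (Int × List Int)) (seq_len : Int) :
    List (List String) × List (List String) :=
  let keys := dict_keys_time.map Prod.fst
  let start := (PySem.List.pyGet? keys 0).getD 0        -- IndexError on empty dict: excluded by Pre_
  let «end» := (PySem.List.pyGet? keys (-1)).getD 0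
  if «end» ≤ start then ([], []) else
  let L := max seq_len 0
  let padded := List.replicate (L - 1).toNat "e" ++
      (PySem.List.pyRange start «end» 1).map (pvRep dict_keys_time)
  let list_train := (PySem.List.pyRange 0 («end» - start) 1).map
      (fun i => PySem.List.slice padded (some i) (some (i + L)))
  let list_target := (PySem.List.pyRange (start + 1) («end» + 1) 1).map
      (fun t => [pvRep dict_keys_time t])
  (list_train, list_target)

-- ===== PRECONDITION & SPEC =====
-- Pre_ excludes only the empty dict, on which A raises IndexError (keys[0]).
def Pre_generate_input_and_target (dict_keys_time : List (Int × List Int)) (seq_len : Int) : Prop :=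
  dict_keys_time ≠ []
instance (dict_keys_time : List (Int × List Int)) (seq_len : Int) :
    Decidable (Pre_generate_input_and_target dict_keys_time seq_len) := by
  unfold Pre_generate_input_and_target; infer_instance

def pvWitness_generate_input_and_target : (List (Int × List Int)) × Int := ([(0, [1, 2]), (2, [])], 2)

def Spec_generate_input_and_target (dict_keys_time : List (Int × List Int)) (seq_len : Int)
    (out : List (List String) × List (List String)) : Prop :=
  out = generate_input_and_target_alt dict_keys_time seq_len
instance (dict_keys_time : List (Int × List Int)) (seq_len : Int)
    (out : List (List String) × List (List String)) :
    Decidable (Spec_generate_input_and_target dict_keys_time seq_len out) := by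
  unfold Spec_generate_input_and_target; infer_instance

-- ===== CLAIM (what is proved, stated in full; the proofs are below) =====
def Claim_equal_generate_input_and_target : Prop := ∀ (dict_keys_time : List (Int × List Int)) (seq_len : Int), Dom_generate_input_and_target dict_keys_time seq_len → Pre_generate_input_and_target dict_keys_time seq_len → Spec_generate_input_and_target dict_keys_time seq_len (generate_input_and_target dict_keys_time seq_len)

-- ===== LEMMAS AND PROOFS =====

-- a foldl that appends one element to each component is a pair of maps
theorem pv_foldl_pair {α β γ : Type} (l : List α) (f : α → β) (g : α → γ)
    (tr : List β) (tg : List γ) :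
    l.foldl (fun acc p => (acc.1 ++ [f p], acc.2 ++ [g p])) (tr, tg) =
      (tr ++ l.map f, tg ++ l.map g) := by
  induction l generalizing tr tg with
  | nil => simp
  | cons x xs ih => simp [List.foldl_cons, ih]

theorem pv_foldl_append_singleton {α β : Type} (l : List α) (f : α → β) (init : List β) :
    l.foldl (fun acc x => acc ++ [f x]) init = init ++ l.map f := by
  induction l generalizing init with
  | nil => simp
  | cons x xs ih => simp [List.foldl_cons, ih]

theorem pv_enumerate_map_range {α : Type} (n : Nat) (f : Nat → α) :
    PySem.List.enumerate ((List.range n).map f) 0 =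
      (List.range n).map (fun (k : Nat) => ((k : Int), f k)) := by
  induction n with
  | zero => simp [PySem.List.enumerate_nil]
  | succ m ih =>
      rw [List.range_succ]
      simp only [List.map_append, List.map_cons, List.map_nil,
        PySem.List.enumerate_append, ih]
      simp [PySem.List.enumerate_cons, PySem.List.enumerate_nil]

theorem pv_map_pyRange_shift {α : Type} (a b c : Int) (f : Int → α) :
    (PySem.List.pyRange a b 1).map (fun j => f (c + j)) =
      (PySem.List.pyRange (c + a) (c + b) 1).map f := by
  rw [PySem.List.pyRange_one, PySem.List.pyRange_one]
  have : (c + b) - (c + a) = b - a := by ring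
  rw [this]
  simp only [List.map_map]
  apply List.map_congr_left
  intro k _
  simp only [Function.comp]
  ring_nf

-- the central row lemma: A's row k equals the window slice of B's padded table
theorem pv_row_eq_slice (d : List (Int × List Int)) (seq_len s e : Int) (k : Nat)
    (hk : (k : Int) < e - s) :
    pvRowA d seq_len ((k : Int), s + k) =
      PySem.List.slice
        (List.replicate ((max seq_len 0) - 1).toNat "e" ++
          (PySem.List.pyRange s e 1).map (pvRep d))
        (some (k : Int)) (some ((k : Int) + max seq_len 0)) := by
  have hL0 : (0 : Int) ≤ max seq_len 0 := le_max_right _ _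
  rw [PySem.List.slice_toNat _ (by positivity) (by omega)]
  simp only [Int.toNat_natCast]
  have hLt : ((k : Int) + max seq_len 0).toNat - k = (max seq_len 0).toNat := by omega
  rw [hLt]
  by_cases hsl : seq_len ≤ 0
  · -- seq_len ≤ 0: A's row is empty, B's window has width 0
    have hL : max seq_len 0 = 0 := by omega
    have hnk : ¬ ((k : Int) < seq_len) := by omega
    simp only [pvRowA, if_neg hnk, hL]
    rw [PySem.List.pyRange_one_eq_nil hsl]
    simp
  · rw [not_le] at hsl
    have hL : max seq_len 0 = seq_len := by omega
    rw [hL]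
    by_cases hks : (k : Int) < seq_len
    · -- padded row: seq_len - k - 1 "e"s then the times s .. s+k
      simp only [pvRowA, if_pos hks]
      rw [pv_foldl_append_singleton (PySem.List.pyRange (seq_len - (k : Int) - 1) seq_len 1)]
      rw [pv_foldl_append_singleton (PySem.List.pyRange 0 (seq_len - (k : Int) - 1) 1) _ []]
      rw [List.nil_append, List.map_const', PySem.List.length_pyRange_one]
      have h6 : ∀ j ∈ PySem.List.pyRange (seq_len - (k : Int) - 1) seq_len 1,
          pvRep d (s + (k : Int) - (seq_len - j - 1)) =
          pvRep d (s + (k : Int) - seq_len + 1 + j) := by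
        intro j _; congr 1; ring
      rw [List.map_congr_left h6, pv_map_pyRange_shift]
      have h4 : s + (k : Int) - seq_len + 1 + (seq_len - (k : Int) - 1) = s := by ring
      have h5 : s + (k : Int) - seq_len + 1 + seq_len = s + (k : Int) + 1 := by ring
      rw [h4, h5]
      -- now rewrite B's window
      have hsplit : PySem.List.pyRange s e 1 =
          PySem.List.pyRange s (s + (k : Int) + 1) 1 ++
          PySem.List.pyRange (s + (k : Int) + 1) e 1 :=
        PySem.List.pyRange_one_append _ _ _ (by omega) (by omega)
      rw [hsplit, List.map_append]
      have hrep : List.replicate (seq_len - 1).toNat "e" =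
          List.replicate k "e" ++ List.replicate ((seq_len - 1).toNat - k) "e" := by
        rw [← List.replicate_add]; congr 1; omega
      rw [hrep, List.append_assoc]
      rw [List.drop_left' (by simp)]
      rw [← List.append_assoc]
      rw [List.take_left' (by
        simp [List.length_append, List.length_replicate, List.length_map, PySem.List.length_pyRange_one]
        omega)]
      congr 2
      omega
    · -- no padding: the full window of times s+k-seq_len+1 .. s+k
      simp only [pvRowA, if_neg hks]
      rw [pv_foldl_append_singleton (PySem.List.pyRange 0 seq_len 1) _ []]
      rw [List.nil_append]
      have h6 : ∀ j ∈ PySem.List.pyRange 0 seq_len 1,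
          pvRep d (s + (k : Int) - (seq_len - j - 1)) =
          pvRep d (s + (k : Int) - seq_len + 1 + j) := by
        intro j _; congr 1; ring
      rw [List.map_congr_left h6, pv_map_pyRange_shift]
      have h4 : s + (k : Int) - seq_len + 1 + 0 = s + (k : Int) - seq_len + 1 := by ring
      have h5 : s + (k : Int) - seq_len + 1 + seq_len = s + (k : Int) + 1 := by ring
      rw [h4, h5]
      have hsplit : PySem.List.pyRange s e 1 =
          PySem.List.pyRange s (s + (k : Int) - seq_len + 1) 1 ++
          (PySem.List.pyRange (s + (k : Int) - seq_len + 1) (s + (k : Int) + 1) 1 ++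
           PySem.List.pyRange (s + (k : Int) + 1) e 1) := by
        rw [← PySem.List.pyRange_one_append (s + (k : Int) - seq_len + 1) (s + (k : Int) + 1) e
          (by omega) (by omega)]
        exact PySem.List.pyRange_one_append _ _ _ (by omega) (by omega)
      rw [hsplit, List.map_append, List.map_append, ← List.append_assoc]
      rw [List.drop_left' (by
        simp [List.length_append, List.length_replicate, List.length_map, PySem.List.length_pyRange_one]
        omega)]
      rw [List.take_left' (by
        simp [List.length_map, PySem.List.length_pyRange_one])]

theorem generate_input_and_target_spec : Claim_equal_generate_input_and_target := by
  intro d seq_len _ _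
  unfold Spec_generate_input_and_target
  simp only [generate_input_and_target, generate_input_and_target_alt]
  set s := (PySem.List.pyGet? (d.map Prod.fst) 0).getD 0 with hs
  set e := (PySem.List.pyGet? (d.map Prod.fst) (-1)).getD 0 with he
  by_cases hese : e ≤ s
  · rw [if_pos hese, PySem.List.pyRange_one_eq_nil hese]
    simp [PySem.List.enumerate_nil]
  rw [if_neg hese]
  rw [pv_foldl_pair _ (fun p => pvRowA d seq_len p) (fun p => [pvRep d (p.2 + 1)]) [] []]
  rw [PySem.List.pyRange_one s e, pv_enumerate_map_range]
  rw [PySem.List.pyRange_one 0 (e - s), PySem.List.pyRange_one (s + 1) (e + 1)]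
  have h1 : (e - s - 0).toNat = (e - s).toNat := by norm_num
  have h2 : ((e + 1) - (s + 1)).toNat = (e - s).toNat := by ring_nf
  rw [h1, h2]
  simp only [List.map_map, List.nil_append]
  apply Prod.ext
  · apply List.map_congr_left
    intro k hk
    have hk' : (k : Int) < e - s := by
      have := List.mem_range.mp hk
      omega
    simp only [Function.comp_def, zero_add]
    have hmm : List.map (fun (x : Nat) => pvRep d (s + (x : Int))) (List.range (e - s).toNat) =
        (PySem.List.pyRange s e 1).map (pvRep d) := by
      rw [PySem.List.pyRange_one]; simp [List.map_map, Function.comp_def]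
    rw [hmm]
    exact pv_row_eq_slice d seq_len s e k hk'
  · apply List.map_congr_left
    intro k hk
    have h3 : s + (k : Int) + 1 = s + 1 + k := by ring
    simp [h3]
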